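-- pv_equiv track=rewrite | github.com/Fengwenbo1832332119/cybdef | scripts/cskg/reasoner.py | _match_action_indices
-- ===== SOURCE A (Python) =====
-- from typing import Any, Dict, List, Tuple
--
-- def _match_action_indices(
--     action_names: List[str], target_actions: List[str]
-- ) -> List[int]:
--     """
--     target_actions 里的名字是 "RestoreService" / "DecoyApache" 这类；
--     action_names 是 env.action_space.names。
--
--     这里采用“前缀匹配 + 全等匹配”的方式，兼容多个 host 上的同类动作：
--     例如 target="DecoyApache"，action_names 里有一堆 "DecoyApache", "DecoyApache_0", ...
--     """
--     target_set = set(target_actions)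
--     idxs: List[int] = []
--
--     for i, name in enumerate(action_names):
--         if name in target_set:
--             idxs.append(i)
--         else:
--             # 兼容类似 "DecoyApache_E1" 这种
--             for t in target_set:
--                 if name.startswith(t + "_") or name.startswith(t + " "):
--                     idxs.append(i)
--                     break
--
--     return idxs
-- ===== SOURCE B (Python) =====
-- from typing import List
--
--
-- def _match_action_indices(
--     action_names: List[str], target_actions: List[str]
-- ) -> List[int]:
--     # Index the targets in a hash set once; for each name, instead of scanning
--     # every target, scan the name's own separator positions ('_' or ' ') and
--     # look the preceding prefix up in the set.
--     targets = set(target_actions)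
--     idxs: List[int] = []
--     for i, name in enumerate(action_names):
--         if name in targets or any(
--             name[:j] in targets for j, c in enumerate(name) if c in "_ "
--         ):
--             idxs.append(i)
--     return idxs
-- ===== Notes on version B (the rewrite author's own statement) =====
-- stated objective: faster
-- what changed: Instead of scanning every target per name with startswith, B puts the targets in a hash set once and, for each name, checks the name itself and the prefix before each '_' or ' ' position against that set, making the per-name cost independent of the number of targets.
import Mathlib
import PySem

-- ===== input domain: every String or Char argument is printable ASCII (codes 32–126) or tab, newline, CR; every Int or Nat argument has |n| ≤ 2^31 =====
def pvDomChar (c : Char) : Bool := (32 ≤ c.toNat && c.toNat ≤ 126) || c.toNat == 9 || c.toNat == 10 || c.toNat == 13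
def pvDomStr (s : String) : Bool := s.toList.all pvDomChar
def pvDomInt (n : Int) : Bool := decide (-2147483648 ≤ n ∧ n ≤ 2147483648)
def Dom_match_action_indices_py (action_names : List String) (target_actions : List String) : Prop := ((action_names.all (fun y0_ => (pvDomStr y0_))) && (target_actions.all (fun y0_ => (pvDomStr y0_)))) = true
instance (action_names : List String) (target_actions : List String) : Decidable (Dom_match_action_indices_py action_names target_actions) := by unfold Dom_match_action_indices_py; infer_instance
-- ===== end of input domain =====

-- B replaces A's inner scan over all targets by a scan over the name's own
-- separator positions with a hash-set prefix lookup (objective: alternative).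

-- ===== PORT A =====
-- inner 'for t in target_set: if name.startswith(t+"_") or name.startswith(t+" "): append; break'
-- (the break makes the loop's effect order-independent, so iterating the set's element list is exact)
def pvInnerA (name : String) : List String → Bool
  | [] => false
  | t :: ts =>
    if PySem.Str.startswith name (t ++ "_") || PySem.Str.startswith name (t ++ " ") then true
    else pvInnerA name ts

def match_action_indices_py (action_names : List String) (target_actions : List String) : List Int :=
  let targetSet : PySem.Set String := PySem.Set.ofList target_actions
  (PySem.List.enumerate action_names).foldl
    (fun idxs p =>
      if PySem.Set.contains targetSet p.2 then idxs ++ [p.1]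
      else if pvInnerA p.2 targetSet then idxs ++ [p.1] else idxs) []

-- ===== PORT B =====
def match_action_indices_py_alt (action_names : List String) (target_actions : List String) : List Int :=
  let targets : PySem.Set String := PySem.Set.ofList target_actions
  (PySem.List.enumerate action_names).foldl
    (fun idxs p =>
      if PySem.Set.contains targets p.2 ||
          ((PySem.List.enumerate p.2.toList).any (fun q =>
            -- 'c in "_ "' for a single char c is exactly this membership
            "_ ".toList.contains q.2 &&
            PySem.Set.contains targets (String.ofList (PySem.List.slice p.2.toList none (some q.1)))))
      then idxs ++ [p.1] else idxs) []

-- ===== PRECONDITION & SPEC =====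
def Spec_match_action_indices_py (action_names : List String) (target_actions : List String) (out : List Int) : Prop := out = match_action_indices_py_alt action_names target_actions
instance (action_names : List String) (target_actions : List String) (out : List Int) : Decidable (Spec_match_action_indices_py action_names target_actions out) := by unfold Spec_match_action_indices_py; infer_instance

-- ===== CLAIM (what is proved, stated in full; the proofs are below) =====
def Claim_equal_match_action_indices_py : Prop := ∀ (action_names : List String) (target_actions : List String), Dom_match_action_indices_py action_names target_actions → Spec_match_action_indices_py action_names target_actions (match_action_indices_py action_names target_actions)

-- ===== LEMMAS AND PROOFS =====

theorem pv_prefix_sep {xs ts : List Char} {sep : Char} (h : ts ++ [sep] <+: xs) :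
    ∃ hlt : ts.length < xs.length, xs.take ts.length = ts ∧ xs[ts.length] = sep := by
  obtain ⟨rest, hr⟩ := h
  rw [List.append_assoc, List.singleton_append] at hr
  subst hr
  refine ⟨by simp, ?_, ?_⟩
  · simp
  · simp

theorem pv_sep_prefix {xs : List Char} {k : Nat} (hk : k < xs.length) :
    (xs.take k ++ [xs[k]]) <+: xs := by
  have h2 : xs.take (k+1) = xs.take k ++ [xs[k]] := by
    rw [List.take_add_one, List.getElem?_eq_getElem hk]; rfl
  rw [← h2]; exact List.take_prefix _ _

-- A's inner loop is an 'any' over the set's element list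
theorem pvInnerA_eq_any (name : String) (S : List String) :
    pvInnerA name S = S.any (fun t =>
      PySem.Str.startswith name (t ++ "_") || PySem.Str.startswith name (t ++ " ")) := by
  induction S with
  | nil => rfl
  | cons t ts ih =>
    simp only [pvInnerA, List.any_cons]
    split_ifs with h <;> simp_all

-- the two per-name match conditions agree
theorem pvCond_eq (S : List String) (name : String) :
    S.any (fun t =>
      PySem.Str.startswith name (t ++ "_") || PySem.Str.startswith name (t ++ " ")) =
    (PySem.List.enumerate name.toList).any (fun q =>
      "_ ".toList.contains q.2 &&
      PySem.Set.contains S (String.ofList (PySem.List.slice name.toList none (some q.1)))) := by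
  rw [Bool.eq_iff_iff]
  simp only [List.any_eq_true, PySem.List.mem_enumerate_iff, Bool.or_eq_true,
    Bool.and_eq_true, List.contains_eq_mem, decide_eq_true_eq, PySem.Set.contains]
  constructor
  · rintro ⟨t, ht, h⟩
    have h' : t.toList ++ ['_'] <+: name.toList ∨ t.toList ++ [' '] <+: name.toList := by
      rcases h with h | h <;> [left; right] <;>
      · simp only [PySem.Str.startswith_eq, PySem.Chars.startswith_iff,
          String.toList_append] at h
        simpa using h
    rcases h' with h | h <;> obtain ⟨hlt, htake, hget⟩ := pv_prefix_sep h <;>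
      refine ⟨(((t.toList.length : Nat) : Int), name.toList[t.toList.length]'hlt),
        ⟨t.toList.length, hlt, by simp⟩, by simp at hget; simp [hget], ?_⟩ <;>
    · rw [PySem.List.slice_to_natCast, htake]
      simpa using ht
  · rintro ⟨q, ⟨k, hk, rfl⟩, hsep, hmem⟩
    refine ⟨String.ofList (name.toList.take k), ?_, ?_⟩
    · simpa [PySem.List.slice_to_natCast] using hmem
    · have hp := pv_sep_prefix hk
      have hsep' : name.toList[k] = '_' ∨ name.toList[k] = ' ' := by simpa using hsep
      rcases hsep' with h | h
      · left
        simp only [PySem.Str.startswith_eq, PySem.Chars.startswith_iff, String.toList_append]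
        rw [h] at hp; simpa using hp
      · right
        simp only [PySem.Str.startswith_eq, PySem.Chars.startswith_iff, String.toList_append]
        rw [h] at hp; simpa using hp

theorem match_action_indices_py_spec : Claim_equal_match_action_indices_py := by
  intro action_names target_actions _
  unfold Spec_match_action_indices_py match_action_indices_py match_action_indices_py_alt
  apply PySem.List.foldl_congr_mem
  intro acc p _
  rw [pvInnerA_eq_any, pvCond_eq]
  cases hb : PySem.Set.contains (PySem.Set.ofList target_actions) p.2 <;>
    simp only [Bool.false_or, Bool.true_or] <;> rfl
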